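-- pv_equiv track=rewrite | github.com/huypq1709/PFP191 | Lab3_SE184775_PhamQuangHuy/Lab 3a/Q3/Q3.4.py | arrange_string
-- ===== SOURCE A (Python) =====
-- def arrange_string(s):
--     lower = []
--     upper = []
--     for char in s:
--         if char.islower():
--             lower.append(char)
--         else:
--             upper.append(char)
--     sorted_str = ''.join(lower + upper)
--     return sorted_str
-- ===== SOURCE B (Python) =====
-- def arrange_string(s):
--     return ''.join(sorted(s, key=lambda c: not c.islower()))
-- ===== Notes on version B (the rewrite author's own statement) =====
-- stated objective: idiomatic
-- what changed: Replaces the explicit two-bucket loop with a single stable sort keyed on the negated lowercase test, so the lowercase-first partition emerges from sort stability instead of manual list building.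
import Mathlib
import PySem

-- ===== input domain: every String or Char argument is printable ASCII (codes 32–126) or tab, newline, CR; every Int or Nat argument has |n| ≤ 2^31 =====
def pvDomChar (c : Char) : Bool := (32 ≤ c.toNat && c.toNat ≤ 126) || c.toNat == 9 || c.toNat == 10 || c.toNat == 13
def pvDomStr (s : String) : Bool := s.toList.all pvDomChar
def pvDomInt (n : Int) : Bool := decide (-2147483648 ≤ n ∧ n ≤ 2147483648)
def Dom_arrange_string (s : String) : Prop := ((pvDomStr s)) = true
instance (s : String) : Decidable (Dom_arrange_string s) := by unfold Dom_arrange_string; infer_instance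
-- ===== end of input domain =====

-- B replaces A's explicit two-bucket loop by one stable sort keyed on "not islower" (idiomatic; same result).


-- ===== PORT A =====
-- two accumulators (lower, upper), appended in order, then joined lower ++ upper
def arrange_string (s : String) : String :=
  let st := s.toList.foldl
    (fun (acc : List Char × List Char) char =>
      if PySem.Chars.islower char then (acc.1 ++ [char], acc.2)
      else (acc.1, acc.2 ++ [char]))
    ([], [])
  String.mk (st.1 ++ st.2)

-- ===== PORT B =====
-- ''.join(sorted(s, key=lambda c: not c.islower())): False (key 0) before True (key 1)
def arrange_string_alt (s : String) : String :=
  String.mk (PySem.List.sorted s.toList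
    (fun c => if PySem.Chars.islower c then (0 : Nat) else 1) false)

-- ===== PRECONDITION & SPEC =====
def Spec_arrange_string (s : String) (out : String) : Prop := out = arrange_string_alt s
instance (s : String) (out : String) : Decidable (Spec_arrange_string s out) := by unfold Spec_arrange_string; infer_instance

-- ===== CLAIM (what is proved, stated in full; the proofs are below) =====
def Claim_equal_arrange_string : Prop := ∀ (s : String), Dom_arrange_string s → Spec_arrange_string s (arrange_string s)

-- ===== LEMMAS AND PROOFS =====

-- the comparison function used by sorted with this key (reverse = false)
def pvBefore (a b : Char) : Bool :=
  decide ((if PySem.Chars.islower a then (0 : Nat) else 1) < (if PySem.Chars.islower b then (0 : Nat) else 1))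

lemma pvBefore_low_left (a b : Char) (ha : PySem.Chars.islower a = true) :
    pvBefore a b = (!PySem.Chars.islower b) := by
  simp [pvBefore, ha]; by_cases hb : PySem.Chars.islower b = true <;> simp [hb]

lemma pvBefore_high_left (a b : Char) (ha : PySem.Chars.islower a = false) :
    pvBefore a b = false := by
  simp [pvBefore, ha]; by_cases hb : PySem.Chars.islower b = true <;> simp [hb]

-- inserting a lowercase char lands exactly at the L/U boundary
lemma pvInsert_low (x : Char) (hx : PySem.Chars.islower x = true) :
    ∀ (L U : List Char), (∀ c ∈ L, PySem.Chars.islower c = true) →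
      (∀ c ∈ U, PySem.Chars.islower c = false) →
      PySem.List.insertBy pvBefore x (L ++ U) = L ++ x :: U := by
  intro L
  induction L with
  | nil =>
    intro U _ hU
    cases U with
    | nil => simp [PySem.List.insertBy]
    | cons y ys =>
      have hy := hU y (by simp)
      simp [PySem.List.insertBy, pvBefore_low_left x y hx, hy]
  | cons a L ih =>
    intro U hL hU
    have ha := hL a (by simp)
    have : pvBefore x a = false := by simp [pvBefore_low_left x a hx, ha]
    simp [PySem.List.insertBy, this]
    exact ih U (fun c hc => hL c (by simp [hc])) hU

-- inserting a non-lowercase char goes to the very end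
lemma pvInsert_high (x : Char) (hx : PySem.Chars.islower x = false) :
    ∀ (l : List Char), PySem.List.insertBy pvBefore x l = l ++ [x] := by
  intro l
  induction l with
  | nil => simp [PySem.List.insertBy]
  | cons y ys ih => simp [PySem.List.insertBy, pvBefore_high_left x y hx, ih]

-- invariant of the insertion-sort fold: the accumulator stays a lower-block ++ upper-block
lemma pvSort_fold (xs : List Char) :
    ∀ (L U : List Char), (∀ c ∈ L, PySem.Chars.islower c = true) →
      (∀ c ∈ U, PySem.Chars.islower c = false) →
      xs.foldl (fun acc x => PySem.List.insertBy pvBefore x acc) (L ++ U) =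
        (L ++ xs.filter (fun c => PySem.Chars.islower c)) ++
          (U ++ xs.filter (fun c => !PySem.Chars.islower c)) := by
  induction xs with
  | nil => intro L U _ _; simp
  | cons x xs ih =>
    intro L U hL hU
    by_cases hx : PySem.Chars.islower x = true
    · have h1 : PySem.List.insertBy pvBefore x (L ++ U) = (L ++ [x]) ++ U := by
        rw [pvInsert_low x hx L U hL hU]; simp
      have h2 := ih (L ++ [x]) U
        (fun c hc => by rcases List.mem_append.mp hc with h | h
                        · exact hL c h
                        · simp at h; simpa [h] using hx) hU
      simp only [List.foldl_cons, h1, h2, List.filter_cons, hx]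
      simp
    · have hx' : PySem.Chars.islower x = false := by simpa using hx
      have h1 : PySem.List.insertBy pvBefore x (L ++ U) = L ++ (U ++ [x]) := by
        rw [pvInsert_high x hx']; simp
      have h2 := ih L (U ++ [x]) hL
        (fun c hc => by rcases List.mem_append.mp hc with h | h
                        · exact hU c h
                        · simp at h; simpa [h] using hx')
      simp only [List.foldl_cons, h1, h2, List.filter_cons, hx']
      simp

-- B's sorted list is filter lower ++ filter non-lower
lemma pvSorted_eq (xs : List Char) :
    PySem.List.sorted xs (fun c => if PySem.Chars.islower c then (0 : Nat) else 1) false =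
      xs.filter (fun c => PySem.Chars.islower c) ++ xs.filter (fun c => !PySem.Chars.islower c) := by
  have h := pvSort_fold xs [] [] (by simp) (by simp)
  simpa [PySem.List.sorted, pvBefore] using h

-- A's fold over the two buckets computes the two filters
lemma pvA_fold (xs : List Char) :
    ∀ (L U : List Char),
      xs.foldl (fun (acc : List Char × List Char) char =>
          if PySem.Chars.islower char then (acc.1 ++ [char], acc.2)
          else (acc.1, acc.2 ++ [char])) (L, U) =
        (L ++ xs.filter (fun c => PySem.Chars.islower c),
         U ++ xs.filter (fun c => !PySem.Chars.islower c)) := by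
  induction xs with
  | nil => intro L U; simp
  | cons x xs ih =>
    intro L U
    by_cases hx : PySem.Chars.islower x = true
    · simp [List.foldl_cons, hx, ih]
    · have hx' : PySem.Chars.islower x = false := by simpa using hx
      simp [List.foldl_cons, hx', ih]

-- ===== VERDICT (by name: the statement is the Claim_ definition above) =====
theorem arrange_string_spec : Claim_equal_arrange_string := by
  intro s _
  unfold Spec_arrange_string arrange_string arrange_string_alt
  rw [pvSorted_eq, pvA_fold s.toList [] []]
  simp
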